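-- pv_equiv track=rewrite | github.com/sashaperigo/gedcom-tools | serve_viz.py | _add_fams_to_indi
-- ===== SOURCE A (Python) =====
-- def _find_record_block(lines: list[str], xref: str, record_tag: str, label: str) -> tuple[int | None, int | None, str | None]:
--     start = next((i for i, ln in enumerate(lines) if ln.strip() == f'0 {xref} {record_tag}'), None)
--     if start is None:
--         return None, None, f'{label} {xref} not found'
--     end = next((i for i in range(start + 1, len(lines)) if lines[i].startswith('0 ')), len(lines))
--     return start, end, None
--
-- def _find_indi_block(lines: list[str], xref: str) -> tuple[int | None, int | None, str | None]:
--     return _find_record_block(lines, xref, 'INDI', 'Individual')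
--
-- def _add_fams_to_indi(lines: list[str], indi_xref: str, fam_xref: str) -> list[str]:
--     """Insert '1 FAMS fam_xref' at the end of indi_xref's INDI block (idempotent)."""
--     indi_start, indi_end, err = _find_indi_block(lines, indi_xref)
--     if err:
--         return lines
--     target = f'1 FAMS {fam_xref}'
--     for i in range(indi_start + 1, indi_end):
--         if lines[i].strip() == target:
--             return lines   # already present
--     return lines[:indi_end] + [target] + lines[indi_end:]
-- ===== SOURCE B (Python) =====
-- def _add_fams_to_indi(lines, indi_xref, fam_xref):
--     """Single forward pass: copy lines while tracking whether we are inside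
--     the target INDI block and whether the FAMS line is already present."""
--     header = f'0 {indi_xref} INDI'
--     target = f'1 FAMS {fam_xref}'
--     out = []
--     state = 0  # 0 = before the INDI block, 1 = inside it, 2 = past it
--     present = False
--     for ln in lines:
--         if state == 0:
--             out.append(ln)
--             if ln.strip() == header:
--                 state = 1
--         elif state == 1:
--             if ln.startswith('0 '):
--                 if not present:
--                     out.append(target)
--                 state = 2
--             elif ln.strip() == target:
--                 present = True
--             out.append(ln)
--         else:
--             out.append(ln)
--     if state == 1 and not present:
--         out.append(target)
--     return lines if state == 0 or present else out
-- ===== Notes on version B (the rewrite author's own statement) =====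
-- stated objective: alternative
-- what changed: A locates the INDI block start and end by index searches over the list, scans the block again for an existing FAMS line, and splices the result together with slicing; B is a single forward pass that maintains a small state machine (before/inside/past the block, plus a 'FAMS already present' flag) and emits the output as it goes.
import Mathlib
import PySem

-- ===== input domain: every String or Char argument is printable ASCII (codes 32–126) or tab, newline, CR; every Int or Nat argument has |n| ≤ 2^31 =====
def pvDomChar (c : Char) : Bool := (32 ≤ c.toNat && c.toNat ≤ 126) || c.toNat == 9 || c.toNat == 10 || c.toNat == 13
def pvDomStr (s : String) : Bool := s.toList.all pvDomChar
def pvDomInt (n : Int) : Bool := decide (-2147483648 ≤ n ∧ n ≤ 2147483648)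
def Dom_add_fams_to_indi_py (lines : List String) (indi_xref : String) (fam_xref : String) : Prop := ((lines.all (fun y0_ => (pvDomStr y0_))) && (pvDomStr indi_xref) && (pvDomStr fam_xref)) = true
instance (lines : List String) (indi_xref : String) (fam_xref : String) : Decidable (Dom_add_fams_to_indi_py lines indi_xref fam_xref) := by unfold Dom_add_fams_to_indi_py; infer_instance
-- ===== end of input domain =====

-- B replaces A's locate-start/locate-end/scan/splice pipeline by a single forward pass with a
-- small state machine; objective: alternative (same asymptotic cost). Return values only
-- (neither implementation mutates its arguments).

-- ===== PORT A =====
def pvA_find_record_block (lines : List String) (xref : String) (record_tag : String)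
    (label : String) : Option Nat × Option Nat × Option String :=
  match lines.findIdx? (fun ln => PySem.Str.strip ln == "0 " ++ xref ++ " " ++ record_tag) with
  | none => (none, none, some (label ++ " " ++ xref ++ " not found"))
  | some start =>
      (some start,
       some (((List.range' (start + 1) (lines.length - (start + 1))).find?
           (fun i => PySem.Str.startswith (lines.getD i "") "0 ")).getD lines.length),
       none)

def pvA_find_indi_block (lines : List String) (xref : String) :
    Option Nat × Option Nat × Option String :=
  pvA_find_record_block lines xref "INDI" "Individual"

def add_fams_to_indi_py (lines : List String) (indi_xref : String) (fam_xref : String) :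
    List String :=
  match pvA_find_indi_block lines indi_xref with
  | (some start, some endIdx, none) =>
      let target := "1 FAMS " ++ fam_xref
      if (List.range' (start + 1) (endIdx - (start + 1))).any
          (fun i => PySem.Str.strip (lines.getD i "") == target) then
        lines
      else
        lines.take endIdx ++ [target] ++ lines.drop endIdx
  | _ => lines

-- ===== PORT B =====
-- the loop body of Source B, over the state (out, state, present)
def pvBstep (header target : String) (acc : List String × Nat × Bool) (ln : String) :
    List String × Nat × Bool :=
  match acc with
  | (out, 0, present) =>
      (out ++ [ln], if PySem.Str.strip ln == header then 1 else 0, present)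
  | (out, 1, present) =>
      if PySem.Str.startswith ln "0 " then
        ((if present then out else out ++ [target]) ++ [ln], 2, present)
      else if PySem.Str.strip ln == target then (out ++ [ln], 1, true)
      else (out ++ [ln], 1, present)
  | (out, state, present) => (out ++ [ln], state, present)

def add_fams_to_indi_py_alt (lines : List String) (indi_xref : String) (fam_xref : String) :
    List String :=
  let header := "0 " ++ indi_xref ++ " INDI"
  let target := "1 FAMS " ++ fam_xref
  let r := lines.foldl (pvBstep header target) ([], 0, false)
  let out := if r.2.1 == 1 && !r.2.2 then r.1 ++ [target] else r.1
  if r.2.1 == 0 || r.2.2 then lines else out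

-- ===== PRECONDITION & SPEC =====
def Spec_add_fams_to_indi_py (lines : List String) (indi_xref : String) (fam_xref : String) (out : List String) : Prop := out = add_fams_to_indi_py_alt lines indi_xref fam_xref
instance (lines : List String) (indi_xref : String) (fam_xref : String) (out : List String) : Decidable (Spec_add_fams_to_indi_py lines indi_xref fam_xref out) := by unfold Spec_add_fams_to_indi_py; infer_instance

-- ===== CLAIM (what is proved, stated in full; the proofs are below) =====
def Claim_equal_add_fams_to_indi_py : Prop := ∀ (lines : List String) (indi_xref : String) (fam_xref : String), Dom_add_fams_to_indi_py lines indi_xref fam_xref → Spec_add_fams_to_indi_py lines indi_xref fam_xref (add_fams_to_indi_py lines indi_xref fam_xref)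

-- ===== LEMMAS AND PROOFS =====

-- Common recursive characterisation both ports are proved equal to.
-- pvG2 processes the tail after the INDI header line: `none` means the FAMS line was found
-- (so the original list is returned); `some r` is the rewritten tail.
def pvG2 (target : String) : List String → Option (List String)
  | [] => some [target]
  | ln :: rest =>
      if PySem.Str.startswith ln "0 " then some (target :: ln :: rest)
      else if PySem.Str.strip ln == target then none
      else (pvG2 target rest).map (ln :: ·)

def pvG1 (header target : String) : List String → List String
  | [] => []
  | ln :: rest =>
      if PySem.Str.strip ln == header then ln :: (pvG2 target rest).getD rest
      else ln :: pvG1 header target rest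

theorem pvGetD_map_succ (o : Option Nat) (n : Nat) :
    (o.map (· + 1)).getD (n + 1) = o.getD n + 1 := by cases o <;> rfl

-- ---- A-side: the index-based searches, characterised over the tail ----
theorem pvRangeFind (p : String → Bool) :
    ∀ (tl : List String) (s : Nat) (g : Nat → String),
      (∀ k, k < tl.length → g (s + k) = tl.getD k "") →
      ((List.range' s tl.length).find? (fun i => p (g i))).getD (s + tl.length)
        = s + (tl.findIdx? p).getD tl.length := by
  intro tl
  induction tl with
  | nil => intro s g _; simp
  | cons a tl ih =>
      intro s g hg
      have hga : g s = a := by simpa using hg 0 (by simp)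
      rw [show List.range' s (a :: tl).length = s :: List.range' (s + 1) tl.length from rfl]
      by_cases hp : p a
      · have hps : (fun i => p (g i)) s = true := by
          show p (g s) = true
          rw [hga]; exact hp
        rw [List.find?_cons_of_pos (p := fun i => p (g i)) (a := s) hps]
        rw [List.findIdx?_cons, if_pos hp]
        simp
      · have hns : ¬((fun i => p (g i)) s = true) := by
          intro hc
          rw [show (fun i => p (g i)) s = p (g s) from rfl, hga] at hc
          exact hp hc
        rw [List.find?_cons_of_neg (p := fun i => p (g i)) (a := s) hns]
        have hg' : ∀ k, k < tl.length → g (s + 1 + k) = tl.getD k "" := by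
          intro k hk
          have := hg (k + 1) (by simpa using Nat.succ_lt_succ hk)
          rw [show s + 1 + k = s + (k + 1) by omega]
          simpa using this
        have h2 := ih (s + 1) g hg'
        rw [show s + (a :: tl).length = s + 1 + tl.length by simp; omega, h2,
          List.findIdx?_cons, if_neg hp,
          show (a :: tl).length = tl.length + 1 from rfl, pvGetD_map_succ]
        omega

theorem pvRangeAny (p : String → Bool) :
    ∀ (tl : List String) (s : Nat) (g : Nat → String),
      (∀ k, k < tl.length → g (s + k) = tl.getD k "") →
      (List.range' s tl.length).any (fun i => p (g i)) = tl.any p := by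
  intro tl
  induction tl with
  | nil => intro s g _; simp
  | cons a tl ih =>
      intro s g hg
      have hga : g s = a := by simpa using hg 0 (by simp)
      have hg' : ∀ k, k < tl.length → g (s + 1 + k) = tl.getD k "" := by
        intro k hk
        have := hg (k + 1) (by simpa using Nat.succ_lt_succ hk)
        rw [show s + 1 + k = s + (k + 1) by omega]
        simpa using this
      rw [show List.range' s (a :: tl).length = s :: List.range' (s + 1) tl.length from rfl]
      simp only [List.any_cons, hga, ih (s + 1) g hg']

-- pvG2 in terms of A's quantities: the take-bound is the offset of the block end within the
-- tail, the `any` is A's membership scan.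
theorem pvG2_none_iff (t : String) :
    ∀ (rest : List String),
      (pvG2 t rest = none ↔
        ((rest.take ((rest.findIdx? (fun ln => PySem.Str.startswith ln "0 ")).getD rest.length)).any
          (fun ln => PySem.Str.strip ln == t)) = true) := by
  intro rest
  induction rest with
  | nil => simp [pvG2]
  | cons ln rest ih =>
      by_cases hs : PySem.Str.startswith ln "0 " = true
      · rw [List.findIdx?_cons, if_pos hs]
        simp only [pvG2, if_pos hs]
        simp
      · rw [List.findIdx?_cons, if_neg hs,
          show (ln :: rest).length = rest.length + 1 from rfl, pvGetD_map_succ,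
          List.take_succ_cons, List.any_cons]
        by_cases ht : (PySem.Str.strip ln == t) = true
        · simp only [pvG2, if_neg hs, ht]
          simp
        · have ht' : (PySem.Str.strip ln == t) = false := by simpa using ht
          rw [show pvG2 t (ln :: rest) = (pvG2 t rest).map (ln :: ·) from by
            simp only [pvG2]; rw [if_neg hs, if_neg ht], ht', Bool.false_or,
            Option.map_eq_none_iff]
          exact ih

theorem pvG2_some (t : String) :
    ∀ (rest : List String),
      ((rest.take ((rest.findIdx? (fun ln => PySem.Str.startswith ln "0 ")).getD rest.length)).any
          (fun ln => PySem.Str.strip ln == t)) = false →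
      pvG2 t rest = some
        (rest.take ((rest.findIdx? (fun ln => PySem.Str.startswith ln "0 ")).getD rest.length)
          ++ [t] ++
          rest.drop ((rest.findIdx? (fun ln => PySem.Str.startswith ln "0 ")).getD rest.length)) := by
  intro rest
  induction rest with
  | nil => intro _; simp [pvG2]
  | cons ln rest ih =>
      by_cases hs : PySem.Str.startswith ln "0 " = true
      · intro _
        rw [List.findIdx?_cons, if_pos hs]
        simp only [pvG2, if_pos hs]
        simp
      · rw [List.findIdx?_cons, if_neg hs,
          show (ln :: rest).length = rest.length + 1 from rfl, pvGetD_map_succ,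
          List.take_succ_cons, List.drop_succ_cons, List.any_cons]
        intro hany
        obtain ⟨ht, hany2⟩ := Bool.or_eq_false_iff.mp hany
        rw [show pvG2 t (ln :: rest) = (pvG2 t rest).map (ln :: ·) from by
          simp only [pvG2]; rw [if_neg hs, if_neg (by simp [ht])], ih hany2, Option.map_some]
        simp

theorem pvG1_none (h t : String) :
    ∀ (ls : List String), (∀ l ∈ ls, (PySem.Str.strip l == h) = false) → pvG1 h t ls = ls := by
  intro ls
  induction ls with
  | nil => intro _; rfl
  | cons ln rest ih =>
      intro hall
      have h0 : (PySem.Str.strip ln == h) = false := hall ln (List.Mem.head _)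
      rw [show pvG1 h t (ln :: rest) = ln :: pvG1 h t rest from by
        simp only [pvG1]; rw [if_neg (by simp [h0])],
        ih (fun l hl => hall l (List.Mem.tail _ hl))]

theorem pvG1_split (h t : String) :
    ∀ (pre : List String) (hd : String) (rest : List String),
      (∀ l ∈ pre, (PySem.Str.strip l == h) = false) → (PySem.Str.strip hd == h) = true →
      pvG1 h t (pre ++ hd :: rest) = pre ++ hd :: (pvG2 t rest).getD rest := by
  intro pre
  induction pre with
  | nil => intro hd rest _ hhd; simp [pvG1, hhd]
  | cons a pre ih =>
      intro hd rest hall hhd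
      have h0 : (PySem.Str.strip a == h) = false := hall a (List.Mem.head _)
      rw [List.cons_append, show pvG1 h t (a :: (pre ++ hd :: rest))
            = a :: pvG1 h t (pre ++ hd :: rest) from by
          simp only [pvG1]; rw [if_neg (by simp [h0])],
        ih hd rest (fun l hl => hall l (List.Mem.tail _ hl)) hhd]
      simp

-- A equals the common characterisation.
theorem pvA_eq_g1 (lines : List String) (x f : String) :
    add_fams_to_indi_py lines x f = pvG1 ("0 " ++ x ++ " INDI") ("1 FAMS " ++ f) lines := by
  have hhdr : ("0 " ++ x ++ " " ++ "INDI") = ("0 " ++ x ++ " INDI") := by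
    rw [String.append_assoc]; rfl
  cases hfi : lines.findIdx? (fun ln => PySem.Str.strip ln == "0 " ++ x ++ " INDI") with
  | none =>
      have hall := List.findIdx?_eq_none_iff.mp hfi
      rw [pvG1_none _ _ lines (by intro l hl; simpa using hall l hl)]
      simp only [add_fams_to_indi_py, pvA_find_indi_block, pvA_find_record_block, hhdr, hfi]
  | some start =>
      obtain ⟨hlt, hq, hprev⟩ := List.findIdx?_eq_some_iff_getElem.mp hfi
      have hsucc : start + 1 ≤ lines.length := hlt
      obtain ⟨tl, htl⟩ : ∃ l, l = lines.drop (start + 1) := ⟨_, rfl⟩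
      obtain ⟨e, he⟩ : ∃ n,
          n = (tl.findIdx? (fun ln => PySem.Str.startswith ln "0 ")).getD tl.length := ⟨_, rfl⟩
      have hg : ∀ k, k < tl.length → lines.getD (start + 1 + k) "" = tl.getD k "" := by
        intro k _
        rw [htl]
        simp [List.getD, List.getElem?_drop]
      have hlen : lines.length = start + 1 + tl.length := by
        rw [htl, List.length_drop]; omega
      have hele : e ≤ tl.length := by
        rw [he]
        cases hfi2 : tl.findIdx? (fun ln => PySem.Str.startswith ln "0 ") with
        | none => simp
        | some k =>
            have := (List.findIdx?_eq_some_iff_findIdx_eq.mp hfi2).1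
            simp
            omega
      have hend : ((List.range' (start + 1) (lines.length - (start + 1))).find?
            (fun i => PySem.Str.startswith (lines.getD i "") "0 ")).getD lines.length
          = start + 1 + e := by
        rw [show lines.length - (start + 1) = tl.length by omega]
        rw [show ((List.range' (start + 1) tl.length).find?
              (fun i => PySem.Str.startswith (lines.getD i "") "0 ")).getD lines.length
            = ((List.range' (start + 1) tl.length).find?
              (fun i => PySem.Str.startswith (lines.getD i "") "0 ")).getD (start + 1 + tl.length) by
          rw [← hlen]]
        rw [he]
        exact pvRangeFind (fun v => PySem.Str.startswith v "0 ") tl (start + 1) (fun i => lines.getD i "") hg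
      have hany : (List.range' (start + 1) (start + 1 + e - (start + 1))).any
            (fun i => PySem.Str.strip (lines.getD i "") == "1 FAMS " ++ f)
          = (tl.take e).any (fun ln => PySem.Str.strip ln == "1 FAMS " ++ f) := by
        rw [show start + 1 + e - (start + 1) = (tl.take e).length by simp; omega]
        refine pvRangeAny (fun v => PySem.Str.strip v == "1 FAMS " ++ f) (tl.take e) (start + 1) (fun i => lines.getD i "") ?_
        intro k hk
        have hk' : k < e := by
          have := List.length_take_le e tl
          omega
        have hk2 : k < tl.length := by
          have := List.length_take_le' e tl
          omega
        show lines.getD (start + 1 + k) "" = (tl.take e).getD k ""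
        rw [hg k hk2]
        simp [List.getD, List.getElem?_take_of_lt hk']
      have hdec : lines = lines.take start ++ lines[start] :: tl := by
        conv_lhs => rw [← List.take_append_drop (start + 1) lines]
        rw [List.take_succ_eq_append_getElem hlt, ← htl, List.append_assoc,
          List.singleton_append]
        rfl
      have hpre : ∀ l ∈ lines.take start, (PySem.Str.strip l == "0 " ++ x ++ " INDI") = false := by
        intro l hl
        rw [List.mem_take_iff_getElem] at hl
        obtain ⟨j, hj, rfl⟩ := hl
        have hj' : j < start := by omega
        simpa using hprev j hj'
      have hg1 : pvG1 ("0 " ++ x ++ " INDI") ("1 FAMS " ++ f) lines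
          = lines.take start ++ lines[start] :: (pvG2 ("1 FAMS " ++ f) tl).getD tl := by
        conv_lhs => rw [hdec]
        exact pvG1_split _ _ _ _ _ hpre (by simpa using hq)
      simp only [add_fams_to_indi_py, pvA_find_indi_block, pvA_find_record_block, hhdr, hfi,
        hend, hany]
      by_cases hpres : (tl.take e).any (fun ln => PySem.Str.strip ln == "1 FAMS " ++ f) = true
      · rw [if_pos hpres, hg1, ((pvG2_none_iff _ tl).mpr (by rw [← he]; exact hpres))]
        simpa using hdec
      · have hpres' : (tl.take e).any (fun ln => PySem.Str.strip ln == "1 FAMS " ++ f) = false := by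
          simpa using hpres
        rw [if_neg hpres, hg1, pvG2_some _ tl (by rw [← he]; exact hpres'), ← he]
        have htake : lines.take (start + 1 + e)
            = (lines.take start ++ [lines[start]]) ++ tl.take e := by
          rw [htl, List.take_add, List.take_succ_eq_append_getElem hlt]
          rfl
        have hdrop : lines.drop (start + 1 + e) = tl.drop e := by
          rw [htl, List.drop_drop]
        rw [htake, hdrop]
        simp only [Option.getD_some, List.append_assoc, List.cons_append, List.nil_append]

-- ---- B-side: the fold with its state machine equals the common characterisation ----
def pvBfinish (target : String) (orig : List String) (r : List String × Nat × Bool) :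
    List String :=
  if r.2.1 == 0 || r.2.2 then orig
  else if r.2.1 == 1 && !r.2.2 then r.1 ++ [target] else r.1

theorem pvB_state2 (h t : String) :
    ∀ (rest out : List String) (p : Bool),
      rest.foldl (pvBstep h t) (out, 2, p) = (out ++ rest, 2, p) := by
  intro rest
  induction rest with
  | nil => intro out p; simp
  | cons ln rest ih =>
      intro out p
      rw [List.foldl_cons, show pvBstep h t (out, 2, p) ln = (out ++ [ln], 2, p) from rfl, ih]
      simp

theorem pvB_state1_true (h t : String) :
    ∀ (rest out : List String),
      (rest.foldl (pvBstep h t) (out, 1, true)).2.2 = true ∧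
      ((rest.foldl (pvBstep h t) (out, 1, true)).2.1 = 1 ∨
       (rest.foldl (pvBstep h t) (out, 1, true)).2.1 = 2) := by
  intro rest
  induction rest with
  | nil => intro out; simp
  | cons ln rest ih =>
      intro out
      by_cases hs : PySem.Str.startswith ln "0 " = true
      · rw [List.foldl_cons, show pvBstep h t (out, 1, true) ln = (out ++ [ln], 2, true) from by
          simp only [pvBstep]; rw [if_pos hs]; simp, pvB_state2]
        simp
      · by_cases ht : (PySem.Str.strip ln == t) = true
        · rw [List.foldl_cons, show pvBstep h t (out, 1, true) ln = (out ++ [ln], 1, true) from by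
            simp only [pvBstep]; rw [if_neg hs, if_pos ht]]
          exact ih (out ++ [ln])
        · rw [List.foldl_cons, show pvBstep h t (out, 1, true) ln = (out ++ [ln], 1, true) from by
            simp only [pvBstep]; rw [if_neg hs, if_neg ht]]
          exact ih (out ++ [ln])

theorem pvB_inside (h t : String) :
    ∀ (rest pre orig : List String), orig = pre ++ rest →
      pvBfinish t orig (rest.foldl (pvBstep h t) (pre, 1, false))
        = pre ++ (pvG2 t rest).getD rest := by
  intro rest
  induction rest with
  | nil =>
      intro pre orig _
      simp [pvBfinish, pvG2]
  | cons ln rest ih =>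
      intro pre orig horig
      by_cases hs : PySem.Str.startswith ln "0 " = true
      · rw [List.foldl_cons, show pvBstep h t (pre, 1, false) ln
            = (pre ++ [t] ++ [ln], 2, false) from by
          simp only [pvBstep]; rw [if_pos hs]; simp, pvB_state2]
        simp only [pvG2, if_pos hs]
        simp [pvBfinish]
      · by_cases ht : (PySem.Str.strip ln == t) = true
        · rw [List.foldl_cons, show pvBstep h t (pre, 1, false) ln = (pre ++ [ln], 1, true) from by
            simp only [pvBstep]; rw [if_neg hs, if_pos ht]]
          obtain ⟨hp2, hp1⟩ := pvB_state1_true h t rest (pre ++ [ln])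
          rw [show pvBfinish t orig (rest.foldl (pvBstep h t) (pre ++ [ln], 1, true)) = orig from by
            simp [pvBfinish, hp2]]
          simp only [pvG2, if_neg hs, if_pos ht]
          simp [horig]
        · rw [List.foldl_cons, show pvBstep h t (pre, 1, false) ln = (pre ++ [ln], 1, false) from by
            simp only [pvBstep]; rw [if_neg hs, if_neg ht],
            ih (pre ++ [ln]) orig (by simp [horig])]
          simp only [pvG2, if_neg hs, if_neg ht]
          cases pvG2 t rest <;> simp

theorem pvB_before (h t : String) :
    ∀ (ls pre orig : List String), orig = pre ++ ls →
      pvBfinish t orig (ls.foldl (pvBstep h t) (pre, 0, false)) = pre ++ pvG1 h t ls := by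
  intro ls
  induction ls with
  | nil =>
      intro pre orig horig
      simp [pvBfinish, pvG1, horig]
  | cons ln rest ih =>
      intro pre orig horig
      by_cases hh : (PySem.Str.strip ln == h) = true
      · rw [List.foldl_cons, show pvBstep h t (pre, 0, false) ln = (pre ++ [ln], 1, false) from by
          simp only [pvBstep]; rw [if_pos hh],
          pvB_inside h t rest (pre ++ [ln]) orig (by simp [horig])]
        simp only [pvG1, if_pos hh]
        simp
      · rw [List.foldl_cons, show pvBstep h t (pre, 0, false) ln = (pre ++ [ln], 0, false) from by
          simp only [pvBstep]; rw [if_neg hh],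
          ih (pre ++ [ln]) orig (by simp [horig])]
        simp only [pvG1, if_neg hh]
        simp

theorem pvB_eq_g1 (lines : List String) (x f : String) :
    add_fams_to_indi_py_alt lines x f = pvG1 ("0 " ++ x ++ " INDI") ("1 FAMS " ++ f) lines := by
  have h := pvB_before ("0 " ++ x ++ " INDI") ("1 FAMS " ++ f) lines [] lines rfl
  simpa [add_fams_to_indi_py_alt, pvBfinish] using h

-- ===== VERDICT (by name: the statement is the Claim_ definition above) =====
theorem add_fams_to_indi_py_spec : Claim_equal_add_fams_to_indi_py := by
  intro lines x f _
  unfold Spec_add_fams_to_indi_py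
  rw [pvA_eq_g1, pvB_eq_g1]
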